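-- pv_equiv track=rewrite | github.com/farzanashaju/how-does-india-cook-biryani | video-comparison/scripts/utils.py | calculate_action_statistics
-- ===== SOURCE A (Python) =====
-- import math
-- from collections import Counter
-- from typing import Dict, List, Tuple, Optional
--
-- def calculate_action_statistics(action_counts: Counter) -> Tuple[int, int, int]:
--     """
--     Calculate statistics for actions.
--
--     Args:
--         action_counts: Counter of action occurrences
--
--     Returns:
--         Tuple of (num_classes, total_instances, num_comparisons)
--     """
--     num_action_classes = len(action_counts)
--     total_action_instances = sum(action_counts.values())
--
--     num_comparisons = 0
--     for _, count in action_counts.items():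
--         if count >= 2:
--             num_comparisons += math.comb(count, 2)
--
--     return num_action_classes, total_action_instances, num_comparisons
-- ===== SOURCE B (Python) =====
-- def calculate_action_statistics(action_counts):
--     """Count within-class pairs globally: all pairs among positive-count
--     instances minus cross-class pairs, accumulated with a running prefix sum
--     (no per-class combination formula)."""
--     values = action_counts.values()
--     num_classes = len(action_counts)
--     total = sum(values)
--     t = 0      # running number of instances seen (positive counts only)
--     cross = 0  # pairs whose two instances fall in different classes
--     for c in values:
--         if c > 0:
--             cross += t * c
--             t += c
--     num_comparisons = t * (t - 1) // 2 - cross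
--     return num_classes, total, num_comparisons
-- ===== Notes on version B (the rewrite author's own statement) =====
-- stated objective: alternative
-- what changed: Instead of summing math.comb(count,2) per class, B counts all pairs among the positive-count instances globally (t*(t-1)//2) and subtracts the cross-class pairs, which it accumulates with a running prefix sum (cross += t*c) in one pass.
import Mathlib
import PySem

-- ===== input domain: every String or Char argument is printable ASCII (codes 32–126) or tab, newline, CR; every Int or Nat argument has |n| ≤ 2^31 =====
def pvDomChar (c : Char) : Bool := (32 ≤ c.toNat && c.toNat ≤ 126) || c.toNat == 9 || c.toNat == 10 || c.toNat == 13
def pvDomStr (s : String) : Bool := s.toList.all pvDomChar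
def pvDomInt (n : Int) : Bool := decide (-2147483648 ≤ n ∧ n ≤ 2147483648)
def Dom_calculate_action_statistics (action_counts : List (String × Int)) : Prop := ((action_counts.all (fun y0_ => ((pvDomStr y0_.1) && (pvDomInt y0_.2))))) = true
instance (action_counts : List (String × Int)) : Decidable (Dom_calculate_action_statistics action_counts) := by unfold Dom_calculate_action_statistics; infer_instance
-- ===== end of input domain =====

-- B replaces A's per-class comb(count,2) summation by a global count: all pairs among positive-count instances minus the cross-class pairs accumulated via a running prefix sum (alternative algorithm; same cost).

-- ===== PORT A =====
-- math.comb(count, 2) is ported as Nat.choose count.toNat 2; exact here since it is only reached under count ≥ 2.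
def calculate_action_statistics (action_counts : List (String × Int)) : Int × Int × Int :=
  let num_action_classes : Int := action_counts.length
  let total_action_instances : Int := action_counts.foldl (fun s p => s + p.2) 0
  let num_comparisons : Int :=
    action_counts.foldl
      (fun acc p => if p.2 ≥ 2 then acc + ((p.2.toNat.choose 2 : Nat) : Int) else acc) 0
  (num_action_classes, total_action_instances, num_comparisons)

-- ===== PORT B =====
def calculate_action_statistics_alt (action_counts : List (String × Int)) : Int × Int × Int :=
  let values := action_counts.map Prod.snd
  let num_classes : Int := action_counts.length
  let total := values.sum
  let tc := values.foldl (fun (p : Int × Int) c => if c > 0 then (p.1 + c, p.2 + p.1 * c) else p) (0, 0)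
  let num_comparisons := PySem.Int.floordiv (tc.1 * (tc.1 - 1)) 2 - tc.2
  (num_classes, total, num_comparisons)

-- ===== PRECONDITION & SPEC =====
def Spec_calculate_action_statistics (action_counts : List (String × Int)) (out : Int × Int × Int) : Prop := out = calculate_action_statistics_alt action_counts
instance (action_counts : List (String × Int)) (out : Int × Int × Int) : Decidable (Spec_calculate_action_statistics action_counts out) := by unfold Spec_calculate_action_statistics; infer_instance

-- ===== CLAIM (what is proved, stated in full; the proofs are below) =====
def Claim_equal_calculate_action_statistics : Prop := ∀ (action_counts : List (String × Int)), Dom_calculate_action_statistics action_counts → Spec_calculate_action_statistics action_counts (calculate_action_statistics action_counts)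

-- ===== LEMMAS AND PROOFS =====

-- sum of the positive elements
def pvS1 (xs : List Int) : Int := (xs.filter (fun c => decide (c > 0))).sum
-- sum of the squares of the positive elements
def pvS2 (xs : List Int) : Int := ((xs.filter (fun c => decide (c > 0))).map (fun c => c * c)).sum

theorem pvS1_cons_pos (c : Int) (xs : List Int) (hp : c > 0) : pvS1 (c :: xs) = c + pvS1 xs := by
  simp [pvS1, hp]

theorem pvS1_cons_neg (c : Int) (xs : List Int) (hp : ¬ c > 0) : pvS1 (c :: xs) = pvS1 xs := by
  simp [pvS1, hp]

theorem pvS2_cons_pos (c : Int) (xs : List Int) (hp : c > 0) : pvS2 (c :: xs) = c * c + pvS2 xs := by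
  simp [pvS2, hp]

theorem pvS2_cons_neg (c : Int) (xs : List Int) (hp : ¬ c > 0) : pvS2 (c :: xs) = pvS2 xs := by
  simp [pvS2, hp]

theorem pv_sum_foldl (xs : List (String × Int)) (a : Int) :
    xs.foldl (fun s p => s + p.2) a = a + (xs.map Prod.snd).sum := by
  induction xs generalizing a with
  | nil => simp
  | cons x xs ih => simp [List.foldl_cons, ih]; ring

theorem pv_two_mul_choose_two (n : Nat) : 2 * n.choose 2 = n * (n - 1) := by
  induction n with
  | zero => rfl
  | succ m ih =>
    rw [Nat.choose_succ_succ, Nat.choose_one_right, Nat.mul_add, ih]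
    cases m with
    | zero => rfl
    | succ k => simp; ring

-- A's accumulation, doubled, equals (sum of squares) - (sum) over the positive counts.
theorem pv_comps_foldl (xs : List Int) (a : Int) :
    2 * xs.foldl (fun acc c => if c ≥ 2 then acc + ((c.toNat.choose 2 : Nat) : Int) else acc) a
      = 2 * a + pvS2 xs - pvS1 xs := by
  induction xs generalizing a with
  | nil => simp [pvS1, pvS2]
  | cons c xs ih =>
    rw [List.foldl_cons]
    by_cases hp : c > 0
    · rw [pvS1_cons_pos _ _ hp, pvS2_cons_pos _ _ hp]
      by_cases h : c ≥ 2
      · rw [if_pos h, ih]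
        have hn : 1 ≤ c.toNat := by omega
        have h1 := pv_two_mul_choose_two c.toNat
        zify [hn] at h1
        rw [Int.toNat_of_nonneg (by omega : (0:Int) ≤ c)] at h1
        linarith
      · have hc1 : c = 1 := by omega
        rw [if_neg h, ih, hc1]
        ring
    · have h2 : ¬ c ≥ 2 := by omega
      rw [if_neg h2, pvS1_cons_neg _ _ hp, pvS2_cons_neg _ _ hp, ih]

-- S1² − S2 over the positive elements is even.
theorem pv_even_sq_sub (xs : List Int) : ∃ k : Int, pvS1 xs * pvS1 xs - pvS2 xs = 2 * k := by
  induction xs with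
  | nil => exact ⟨0, by simp [pvS1, pvS2]⟩
  | cons c xs ih =>
    obtain ⟨k, hk⟩ := ih
    by_cases hp : c > 0
    · refine ⟨k + c * pvS1 xs, ?_⟩
      rw [pvS1_cons_pos _ _ hp, pvS2_cons_pos _ _ hp]
      linarith
    · rw [pvS1_cons_neg _ _ hp, pvS2_cons_neg _ _ hp]
      exact ⟨k, hk⟩

-- B's pair fold: first component is the running sum of the positive counts;
-- second component (the accumulated cross-class pairs) is x0 + t0*S1 + (S1² − S2)/2.
theorem pv_pairfold (xs : List Int) (t0 x0 : Int) :
    xs.foldl (fun (p : Int × Int) c => if c > 0 then (p.1 + c, p.2 + p.1 * c) else p) (t0, x0)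
      = (t0 + pvS1 xs, x0 + t0 * pvS1 xs + (pvS1 xs * pvS1 xs - pvS2 xs) / 2) := by
  induction xs generalizing t0 x0 with
  | nil => simp [pvS1, pvS2]
  | cons c xs ih =>
    by_cases hp : c > 0
    · simp only [List.foldl_cons, if_pos hp, ih, pvS1_cons_pos _ _ hp, pvS2_cons_pos _ _ hp]
      refine Prod.ext (by ring) ?_
      simp only
      obtain ⟨k, hk⟩ := pv_even_sq_sub xs
      have h2 : (c + pvS1 xs) * (c + pvS1 xs) - (c * c + pvS2 xs) = 2 * (c * pvS1 xs + k) := by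
        linarith
      rw [h2, hk, Int.mul_ediv_cancel_left _ (by norm_num), Int.mul_ediv_cancel_left _ (by norm_num)]
      ring
    · simp only [List.foldl_cons, if_neg hp, ih, pvS1_cons_neg _ _ hp, pvS2_cons_neg _ _ hp]

theorem pv_floordiv_two_mul (k : Int) : PySem.Int.floordiv (2 * k) 2 = k := by
  rw [PySem.Int.floordiv_eq_ediv_of_pos (by norm_num)]
  exact Int.mul_ediv_cancel_left k (by norm_num)

-- ===== VERDICT (by name: the statement is the Claim_ definition above) =====
theorem calculate_action_statistics_spec : Claim_equal_calculate_action_statistics := by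
  intro ac _
  unfold Spec_calculate_action_statistics calculate_action_statistics calculate_action_statistics_alt
  simp only
  refine Prod.ext (by simp) (Prod.ext ?_ ?_)
  · simpa using pv_sum_foldl ac 0
  · have hA := pv_comps_foldl (ac.map Prod.snd) 0
    simp only [mul_zero, zero_add] at hA
    have hfold :
        ac.foldl (fun acc p => if p.2 ≥ 2 then acc + ((p.2.toNat.choose 2 : Nat) : Int) else acc) 0
          = (ac.map Prod.snd).foldl
              (fun acc c => if c ≥ 2 then acc + ((c.toNat.choose 2 : Nat) : Int) else acc) 0 := by
      rw [List.foldl_map]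
    rw [hfold]
    rw [pv_pairfold (ac.map Prod.snd) 0 0]
    simp only [zero_add, zero_mul]
    set s1 := pvS1 (ac.map Prod.snd) with hs1
    set s2 := pvS2 (ac.map Prod.snd) with hs2
    set F := (ac.map Prod.snd).foldl
        (fun acc c => if c ≥ 2 then acc + ((c.toNat.choose 2 : Nat) : Int) else acc) 0 with hF
    obtain ⟨m, hm⟩ := Int.even_mul_pred_self s1
    have hring : s1 * (s1 - 1) = s1 * s1 - s1 := by ring
    have hk : s1 * s1 - s2 = 2 * (m - F) := by omega
    have hdiv : (s1 * s1 - s2) / 2 = m - F := by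
      rw [hk]; exact Int.mul_ediv_cancel_left _ (by norm_num)
    have hfd : PySem.Int.floordiv (s1 * (s1 - 1)) 2 = m := by
      rw [hm, show m + m = 2 * m by ring]; exact pv_floordiv_two_mul m
    rw [hdiv, hfd]
    ring
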